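-- pv_equiv track=rewrite | github.com/Sudharsan1406/RAG | app.py | make_prompt
-- ===== SOURCE A (Python) =====
-- def make_prompt(docs, length="medium", char_limit=3500):
--     header = f"Summarize the following information into a {length} answer.\n"
--     header += "Use only the given passages. Do not add new information.\n\n"
--
--     body = ""
--     for i, d in enumerate(docs):
--         chunk = f"### Passage {i+1}:\n{d['text']}\n\n"
--         if len(body) + len(chunk) > char_limit:
--             break
--         body += chunk
--
--     return header + body + "Write a clear and concise answer."
-- ===== SOURCE B (Python) =====
-- def make_prompt(docs, length="medium", char_limit=3500):
--     header = (f"Summarize the following information into a {length} answer.\n"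
--               "Use only the given passages. Do not add new information.\n\n")
--     return header + _body(docs, 1, char_limit) + "Write a clear and concise answer."
--
--
-- def _body(docs, n, budget):
--     if not docs:
--         return ""
--     chunk = f"### Passage {n}:\n{docs[0]['text']}\n\n"
--     if len(chunk) > budget:
--         return ""
--     return chunk + _body(docs[1:], n + 1, budget - len(chunk))
-- ===== Notes on version B (the rewrite author's own statement) =====
-- stated objective: alternative
-- what changed: Replaces A's imperative enumerate loop that grows a body string and breaks on the accumulated length by a recursive helper over the list that threads the REMAINING character budget downward and concatenates the suffix result, formatting each passage lazily exactly when reached.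
import Mathlib
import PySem

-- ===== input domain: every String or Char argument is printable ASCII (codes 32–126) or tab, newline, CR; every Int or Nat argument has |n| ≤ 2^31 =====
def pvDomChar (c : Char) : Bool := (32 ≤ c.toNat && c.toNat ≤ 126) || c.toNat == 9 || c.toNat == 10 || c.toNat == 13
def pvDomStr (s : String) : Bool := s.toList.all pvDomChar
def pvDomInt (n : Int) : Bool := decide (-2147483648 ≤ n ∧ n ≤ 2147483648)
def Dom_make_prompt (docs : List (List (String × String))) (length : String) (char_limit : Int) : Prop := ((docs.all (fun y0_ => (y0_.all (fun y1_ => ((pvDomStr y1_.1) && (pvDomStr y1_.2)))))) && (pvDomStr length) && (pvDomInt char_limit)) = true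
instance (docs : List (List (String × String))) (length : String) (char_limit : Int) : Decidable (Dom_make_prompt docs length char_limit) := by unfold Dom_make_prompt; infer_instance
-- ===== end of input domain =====

-- B replaces A's accumulate-and-break loop by a recursive helper that threads the remaining
-- character budget downward (alternative decomposition, same cost, identical return values).

-- ===== PORT A =====
-- the f-string chunk "### Passage {i+1}:\n{d['text']}\n\n" of the enumerate pair p
def pvChunkOf (p : Int × List (String × String)) : String :=
  "### Passage " ++ PySem.Int.toStr (p.1 + 1) ++ ":\n" ++ ((PySem.Dict.mk p.2).get? "text").getD "" ++ "\n\n"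

-- the for-loop with its break, over enumerate(docs); body is the accumulator
-- (d['text'] on a missing key raises KeyError in Python; ported as getD "" and excluded by Pre_)
def pvLoopA (char_limit : Int) : List (Int × List (String × String)) → String → String
  | [], body => body
  | p :: rest, body =>
      let chunk := pvChunkOf p
      if PySem.Str.len body + PySem.Str.len chunk > char_limit then body
      else pvLoopA char_limit rest (body ++ chunk)

def make_prompt (docs : List (List (String × String))) (length : String) (char_limit : Int) : String :=
  let header := "Summarize the following information into a " ++ length ++ " answer.\n"
  let header := header ++ "Use only the given passages. Do not add new information.\n\n"
  let body := pvLoopA char_limit (PySem.List.enumerate docs 0) ""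
  header ++ body ++ "Write a clear and concise answer."

-- ===== PORT B =====
-- _body(docs, n, budget): recursion over the list, remaining budget threaded down
def pvBodyB : List (List (String × String)) → Int → Int → String
  | [], _, _ => ""
  | d :: rest, n, budget =>
      let chunk := "### Passage " ++ PySem.Int.toStr n ++ ":\n" ++ ((PySem.Dict.mk d).get? "text").getD "" ++ "\n\n"
      if PySem.Str.len chunk > budget then ""
      else chunk ++ pvBodyB rest (n + 1) (budget - PySem.Str.len chunk)

def make_prompt_alt (docs : List (List (String × String))) (length : String) (char_limit : Int) : String :=
  let header := "Summarize the following information into a " ++ length ++ " answer.\nUse only the given passages. Do not add new information.\n\n"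
  header ++ pvBodyB docs 1 char_limit ++ "Write a clear and concise answer."

-- ===== PRECONDITION & SPEC =====
-- running prefix sums of the chunk lengths (used only to state Pre_)
def pvTotals : List Int → Int → List Int
  | [], _ => []
  | l :: ls, t => (t + l) :: pvTotals ls (t + l)

-- Pre_ excludes exactly the inputs on which Python A raises KeyError: a doc without a "text"
-- key that the loop actually reaches (i.e. no earlier running total already exceeds the limit).
-- B raises KeyError on exactly the same inputs.
def Pre_make_prompt (docs : List (List (String × String))) (length : String) (char_limit : Int) : Prop :=
  ∀ i : Nat, i < docs.length →
    ((docs.getD i []).any (fun kv => kv.1 == "text")) = false →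
    ∃ j : Nat, j < i ∧
      char_limit < (pvTotals ((PySem.List.enumerate docs 0).map (fun p => PySem.Str.len (pvChunkOf p))) 0).getD j 0
instance (docs : List (List (String × String))) (length : String) (char_limit : Int) : Decidable (Pre_make_prompt docs length char_limit) := by unfold Pre_make_prompt; infer_instance

def pvWitness_make_prompt : (List (List (String × String))) × String × Int :=
  ([[("text", "alpha")], [("text", "beta")]], "short", 40)

def Spec_make_prompt (docs : List (List (String × String))) (length : String) (char_limit : Int) (out : String) : Prop := out = make_prompt_alt docs length char_limit
instance (docs : List (List (String × String))) (length : String) (char_limit : Int) (out : String) : Decidable (Spec_make_prompt docs length char_limit out) := by unfold Spec_make_prompt; infer_instance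

-- ===== CLAIM (what is proved, stated in full; the proofs are below) =====
def Claim_equal_make_prompt : Prop := ∀ (docs : List (List (String × String))) (length : String) (char_limit : Int), Dom_make_prompt docs length char_limit → Pre_make_prompt docs length char_limit → Spec_make_prompt docs length char_limit (make_prompt docs length char_limit)

-- ===== LEMMAS AND PROOFS =====

theorem pvLen_append (a b : String) : PySem.Str.len (a ++ b) = PySem.Str.len a + PySem.Str.len b := by
  simp

-- A's loop with accumulator b equals b followed by B's budget recursion on the tail
theorem pvLoopA_eq_body (cl : Int) (docs : List (List (String × String))) (k : Int) (b : String) :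
    pvLoopA cl (PySem.List.enumerate docs k) b = b ++ pvBodyB docs (k + 1) (cl - PySem.Str.len b) := by
  induction docs generalizing k b with
  | nil => simp [PySem.List.enumerate_nil, pvLoopA, pvBodyB]
  | cons d rest ih =>
      rw [PySem.List.enumerate_cons]
      simp only [pvLoopA, pvBodyB, pvChunkOf]
      split_ifs with h1 h2 h2
      · simp
      · exact absurd (by omega) h2
      · exact absurd (by omega) h1
      · rw [ih, pvLen_append]
        have he : cl - (PySem.Str.len b + PySem.Str.len ("### Passage " ++ PySem.Int.toStr (k + 1) ++ ":\n" ++ ((PySem.Dict.mk d).get? "text").getD "" ++ "\n\n")) = cl - PySem.Str.len b - PySem.Str.len ("### Passage " ++ PySem.Int.toStr (k + 1) ++ ":\n" ++ ((PySem.Dict.mk d).get? "text").getD "" ++ "\n\n") := by omega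
        rw [he, String.append_assoc]

theorem pvHeaderLit :
    (" answer.\n" : String) ++ "Use only the given passages. Do not add new information.\n\n"
      = " answer.\nUse only the given passages. Do not add new information.\n\n" := by decide

-- ===== VERDICT (by name: the statement is the Claim_ definition above) =====
theorem make_prompt_spec : Claim_equal_make_prompt := by
  intro docs length char_limit _ _
  show make_prompt docs length char_limit = make_prompt_alt docs length char_limit
  simp only [make_prompt, make_prompt_alt]
  rw [pvLoopA_eq_body]
  have hlen : PySem.Str.len "" = 0 := by decide
  rw [hlen]
  simp [String.append_assoc, pvHeaderLit]
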